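-- pv_equiv track=rewrite | github.com/hbrunie/tvm_ttile | ttile/tensorize/tensorize_ttile/parser.py | find_fuse
-- ===== SOURCE A (Python) =====
-- def find_fuse(structure, level, order):
--     """
--     Function to find the fuse
--     """
--     fuse = []
--     fuse_int = []
--     nb_iteration = 0
--     nb_iteration_fuse = []
--     for k in range(level-1):
--         begin = structure[k + 1][4][1]
--         end = structure[k + 1][4][2]
--         split = structure[k + 1][4][3]
--         no_useless = (end - begin) // split != 1
--         if "in_channels" not in order[k]:
--             fuse_int += [order[k]]
--             nb_iteration += (end - begin) // split
--         else:
--             fuse += [fuse_int]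
--             nb_iteration_fuse += [nb_iteration]
--             fuse_int = []
--             nb_iteration = 0
--     fuse += [fuse_int]
--     nb_iteration_fuse += [nb_iteration]
--     maxi = 0
--     id_max = 0
--     for k in range(len(fuse)):
--         if nb_iteration_fuse[k] > maxi:
--             maxi = nb_iteration_fuse[k]
--             id_max = k
--     return fuse[id_max], maxi
-- ===== SOURCE B (Python) =====
-- def find_fuse(structure, level, order):
--     """
--     Index-arithmetic rewrite: locate the separator positions, take prefix sums
--     of the per-level iteration counts, and read each group off as a slice of
--     `order` between consecutive cuts with its total as a prefix-sum difference;
--     the winner is max(totals) (first occurrence; floored to the first group, 0,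
--     when no total is positive).
--     """
--     n = max(level - 1, 0)
--     iters = [(structure[k + 1][4][2] - structure[k + 1][4][1]) // structure[k + 1][4][3]
--              for k in range(n)]
--     pref = [0]
--     for v in iters:
--         pref.append(pref[-1] + v)
--     cuts = [-1] + [k for k in range(n) if "in_channels" in order[k]] + [n]
--     totals = [pref[b] - pref[a + 1] for a, b in zip(cuts, cuts[1:])]
--     best = max(totals)
--     if best <= 0:
--         return order[cuts[0] + 1:cuts[1]], 0
--     j = totals.index(best)
--     return order[cuts[j] + 1:cuts[j + 1]], best
-- ===== Notes on version B (the rewrite author's own statement) =====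
-- stated objective: alternative
-- what changed: B replaces A's streaming flush-the-accumulators pass with index arithmetic: it collects the separator positions into a cut list, builds a prefix-sum array of the per-level iteration counts, reads each group off as a slice of order between consecutive cuts with its total as a prefix-sum difference, and selects by max()+index() with a floor-at-zero fallback to the first group.
import Mathlib
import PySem

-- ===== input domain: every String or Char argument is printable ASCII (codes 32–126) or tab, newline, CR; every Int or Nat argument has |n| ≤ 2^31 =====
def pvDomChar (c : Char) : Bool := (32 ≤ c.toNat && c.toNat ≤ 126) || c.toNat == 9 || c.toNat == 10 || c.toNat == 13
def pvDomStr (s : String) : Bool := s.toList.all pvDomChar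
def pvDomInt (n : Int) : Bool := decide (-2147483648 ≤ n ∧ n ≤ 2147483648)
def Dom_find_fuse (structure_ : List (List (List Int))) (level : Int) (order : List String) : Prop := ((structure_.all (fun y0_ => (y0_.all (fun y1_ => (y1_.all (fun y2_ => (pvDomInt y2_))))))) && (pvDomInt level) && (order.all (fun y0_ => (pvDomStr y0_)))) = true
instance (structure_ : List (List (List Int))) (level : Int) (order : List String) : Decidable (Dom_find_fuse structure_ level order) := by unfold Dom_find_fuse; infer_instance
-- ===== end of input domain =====

-- B rebuilds the groups by index arithmetic (separator cuts + prefix sums + slices of order)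
-- instead of A's streaming flush accumulators (objective: alternative algorithm, same cost).


-- ===== PORT A =====
-- body of A's first for-loop (state: fuse, fuse_int, nb_iteration, nb_iteration_fuse)
def stepA (structure_ : List (List (List Int))) (order : List String)
    (st : List (List String) × List String × Int × List Int) (k : Int) :
    List (List String) × List String × Int × List Int :=
  let begin_ := PySem.List.pyGetD (PySem.List.pyGetD (PySem.List.pyGetD structure_ (k + 1) []) 4 []) 1 0
  let end_   := PySem.List.pyGetD (PySem.List.pyGetD (PySem.List.pyGetD structure_ (k + 1) []) 4 []) 2 0
  let split  := PySem.List.pyGetD (PySem.List.pyGetD (PySem.List.pyGetD structure_ (k + 1) []) 4 []) 3 0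
  -- Python also computes 'no_useless = (end - begin) // split != 1' and never uses it
  if PySem.Str.isIn "in_channels" (PySem.List.pyGetD order k "") = false then
    (st.1, st.2.1 ++ [PySem.List.pyGetD order k ""],
     st.2.2.1 + PySem.Int.floordiv (end_ - begin_) split, st.2.2.2)
  else
    (st.1 ++ [st.2.1], [], 0, st.2.2.2 ++ [st.2.2.1])

-- body of A's second for-loop (state: maxi, id_max)
def selStepA (nbf : List Int) (mi : Int × Int) (k : Int) : Int × Int :=
  if PySem.List.pyGetD nbf k 0 > mi.1 then (PySem.List.pyGetD nbf k 0, k) else mi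

def find_fuse (structure_ : List (List (List Int))) (level : Int) (order : List String) : List String × Int :=
  let st := (PySem.List.pyRange 0 (level - 1) 1).foldl (stepA structure_ order) ([], [], 0, [])
  let fuse := st.1 ++ [st.2.1]
  let nbf := st.2.2.2 ++ [st.2.2.1]
  let m := (PySem.List.pyRange 0 (fuse.length : Int) 1).foldl (selStepA nbf) (0, 0)
  (PySem.List.pyGetD fuse m.2 [], m.1)

-- ===== PORT B =====
-- '(structure[k+1][4][2] - structure[k+1][4][1]) // structure[k+1][4][3]'
def cellIter (structure_ : List (List (List Int))) (k : Int) : Int :=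
  let cell := PySem.List.pyGetD (PySem.List.pyGetD structure_ (k + 1) []) 4 []
  PySem.Int.floordiv (PySem.List.pyGetD cell 2 0 - PySem.List.pyGetD cell 1 0) (PySem.List.pyGetD cell 3 0)

-- 'pref.append(pref[-1] + v)'
def prefStep (p : List Int) (v : Int) : List Int :=
  p ++ [PySem.List.pyGetD p (-1) 0 + v]

def find_fuse_alt (structure_ : List (List (List Int))) (level : Int) (order : List String) : List String × Int :=
  let n : Int := max (level - 1) 0
  let iters := (PySem.List.pyRange 0 n 1).map (cellIter structure_)
  let pref := iters.foldl prefStep [0]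
  let cuts := [-1] ++ (PySem.List.pyRange 0 n 1).filter
      (fun k => PySem.Str.isIn "in_channels" (PySem.List.pyGetD order k "")) ++ [n]
  let totals := (cuts.zip (PySem.List.slice cuts (some 1) none)).map
      (fun ab => PySem.List.pyGetD pref ab.2 0 - PySem.List.pyGetD pref (ab.1 + 1) 0)
  -- totals is nonempty, so Python's max(totals) cannot raise
  let best := (PySem.List.max? totals (fun t => t)).getD 0
  if best ≤ 0 then
    (PySem.List.slice order (some (PySem.List.pyGetD cuts 0 0 + 1)) (some (PySem.List.pyGetD cuts 1 0)), 0)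
  else
    -- 'totals.index(best)': best ∈ totals, so index? is some
    let j : Int := (((PySem.List.index? totals best).getD 0 : Nat) : Int)
    (PySem.List.slice order (some (PySem.List.pyGetD cuts j 0 + 1)) (some (PySem.List.pyGetD cuts (j + 1) 0)), best)

-- ===== PRECONDITION & SPEC =====
-- Pre_ excludes exactly the inputs where Python A raises: an index k+1 ≥ len(structure),
-- a row shorter than 5, a cell shorter than 4 (IndexError), split == 0 (ZeroDivisionError),
-- or k ≥ len(order) (IndexError), for some k in range(level-1).
def Pre_find_fuse (structure_ : List (List (List Int))) (level : Int) (order : List String) : Prop :=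
  (level - 1).toNat ≤ order.length ∧
  ∀ k : Nat, k < min (level - 1).toNat order.length →
    k + 1 < structure_.length ∧
    5 ≤ (structure_.getD (k + 1) []).length ∧
    4 ≤ ((structure_.getD (k + 1) []).getD 4 []).length ∧
    ((structure_.getD (k + 1) []).getD 4 []).getD 3 0 ≠ 0
instance (structure_ : List (List (List Int))) (level : Int) (order : List String) : Decidable (Pre_find_fuse structure_ level order) := by unfold Pre_find_fuse; infer_instance
def pvWitness_find_fuse : List (List (List Int)) × Int × List String :=
  ([[], [[], [], [], [], [0, 1, 2, 1]]], 2, ["a"])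

def Spec_find_fuse (structure_ : List (List (List Int))) (level : Int) (order : List String) (out : List String × Int) : Prop := out = find_fuse_alt structure_ level order
instance (structure_ : List (List (List Int))) (level : Int) (order : List String) (out : List String × Int) : Decidable (Spec_find_fuse structure_ level order out) := by unfold Spec_find_fuse; infer_instance

-- ===== CLAIM (what is proved, stated in full; the proofs are below) =====
def Claim_equal_find_fuse : Prop := ∀ (structure_ : List (List (List Int))) (level : Int) (order : List String), Dom_find_fuse structure_ level order → Pre_find_fuse structure_ level order → Spec_find_fuse structure_ level order (find_fuse structure_ level order)

-- ===== LEMMAS AND PROOFS =====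

-- proof-side abbreviations
def ordAt (order : List String) (k : Int) : String := PySem.List.pyGetD order k ""
def sepAt (order : List String) (k : Int) : Bool := PySem.Str.isIn "in_channels" (ordAt order k)

-- reference flush step (A's first loop, with (segment, total) records kept together)
def stepR (structure_ : List (List (List Int))) (order : List String)
    (st : List (List String × Int) × List String × Int) (k : Int) :
    List (List String × Int) × List String × Int :=
  if sepAt order k = true then
    (st.1 ++ [(st.2.1, st.2.2)], [], 0)
  else
    (st.1, st.2.1 ++ [ordAt order k], st.2.2 + cellIter structure_ k)

def mapFirst {α : Type} (f : α → α) : List α → List α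
  | [] => []
  | x :: r => f x :: r

-- the group list, by recursion on the index list (prepending into the first group)
def recGroups (structure_ : List (List (List Int))) (order : List String) : List Int → List (List String × Int)
  | [] => [([], 0)]
  | k :: r => if sepAt order k = true then ([], 0) :: recGroups structure_ order r
              else mapFirst (fun g => (ordAt order k :: g.1, cellIter structure_ k + g.2))
                     (recGroups structure_ order r)

def segOf (order : List String) (a b : Int) : List String :=
  (PySem.List.pyRange a b 1).map (ordAt order)
def sumOf (structure_ : List (List (List Int))) (a b : Int) : Int :=
  ((PySem.List.pyRange a b 1).map (cellIter structure_)).sum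
def pairsOf (lo : Int) (cs : List Int) (hi : Int) : List (Int × Int) :=
  (lo :: cs).zip (cs ++ [hi])

-- left-to-right recursive form of A's selection loop
def selLoop (ts : List Int) (i maxi id : Int) : Int × Int :=
  match ts with
  | [] => (maxi, id)
  | t :: r => if t > maxi then selLoop r (i + 1) t i else selLoop r (i + 1) maxi id

lemma sepAt_chars (order : List String) (k : Int) :
    PySem.Chars.isIn ['i', 'n', '_', 'c', 'h', 'a', 'n', 'n', 'e', 'l', 's']
      (PySem.List.pyGetD order k "").toList = sepAt order k := by
  simp [sepAt, ordAt]

lemma recGroups_ne_nil (structure_ : List (List (List Int))) (order : List String)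
    (ks : List Int) : recGroups structure_ order ks ≠ [] := by
  cases ks with
  | nil => simp [recGroups]
  | cons k r =>
    simp only [recGroups]
    split
    · simp
    · cases h : recGroups structure_ order r with
      | nil => exact absurd h (recGroups_ne_nil structure_ order r)
      | cons g t => simp [mapFirst]

-- A's four accumulators track the records of the reference flush fold
lemma phase1_rel (structure_ : List (List (List Int))) (order : List String) :
    ∀ (ks : List Int) (gs : List (List String × Int)) (fi : List String) (nb : Int),
      ks.foldl (stepA structure_ order) (gs.map Prod.fst, fi, nb, gs.map Prod.snd)
        = ((ks.foldl (stepR structure_ order) (gs, fi, nb)).1.map Prod.fst,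
           (ks.foldl (stepR structure_ order) (gs, fi, nb)).2.1,
           (ks.foldl (stepR structure_ order) (gs, fi, nb)).2.2,
           (ks.foldl (stepR structure_ order) (gs, fi, nb)).1.map Prod.snd) := by
  intro ks
  induction ks with
  | nil => intro gs fi nb; simp
  | cons k r ih =>
    intro gs fi nb
    simp only [List.foldl_cons]
    by_cases h : sepAt order k = true
    · have hA : stepA structure_ order (gs.map Prod.fst, fi, nb, gs.map Prod.snd) k
          = ((gs ++ [(fi, nb)]).map Prod.fst, [], 0, (gs ++ [(fi, nb)]).map Prod.snd) := by
        simp [stepA, sepAt_chars, h]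
      have hB : stepR structure_ order (gs, fi, nb) k = (gs ++ [(fi, nb)], [], 0) := by
        simp [stepR, h]
      rw [hA, hB]; exact ih (gs ++ [(fi, nb)]) [] 0
    · have h' : sepAt order k = false := by simpa using h
      have hA : stepA structure_ order (gs.map Prod.fst, fi, nb, gs.map Prod.snd) k
          = (gs.map Prod.fst, fi ++ [ordAt order k], nb + cellIter structure_ k, gs.map Prod.snd) := by
        simp [stepA, sepAt_chars, h', cellIter, ordAt]
      have hB : stepR structure_ order (gs, fi, nb) k
          = (gs, fi ++ [ordAt order k], nb + cellIter structure_ k) := by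
        simp [stepR, h']
      rw [hA, hB]; exact ih gs _ _

lemma mapFirst_mapFirst {α : Type} (f g : α → α) (l : List α) :
    mapFirst f (mapFirst g l) = mapFirst (fun x => f (g x)) l := by
  cases l <;> simp [mapFirst]

-- the flush fold computes recGroups
lemma flush_eq_recGroups (structure_ : List (List (List Int))) (order : List String) :
    ∀ (ks : List Int) (gs : List (List String × Int)) (seg : List String) (tot : Int),
      (ks.foldl (stepR structure_ order) (gs, seg, tot)).1
        ++ [((ks.foldl (stepR structure_ order) (gs, seg, tot)).2.1,
             (ks.foldl (stepR structure_ order) (gs, seg, tot)).2.2)]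
      = gs ++ mapFirst (fun g => (seg ++ g.1, tot + g.2)) (recGroups structure_ order ks) := by
  intro ks
  induction ks with
  | nil => intro gs seg tot; simp [recGroups, mapFirst]
  | cons k r ih =>
    intro gs seg tot
    simp only [List.foldl_cons]
    by_cases h : sepAt order k = true
    · rw [show stepR structure_ order (gs, seg, tot) k = (gs ++ [(seg, tot)], [], 0) by
        simp [stepR, h]]
      rw [ih]
      simp only [recGroups, h, if_pos]
      cases hg : recGroups structure_ order r with
      | nil => exact absurd hg (recGroups_ne_nil structure_ order r)
      | cons g t => simp [mapFirst]
    · have h' : sepAt order k = false := by simpa using h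
      rw [show stepR structure_ order (gs, seg, tot) k
            = (gs, seg ++ [ordAt order k], tot + cellIter structure_ k) by simp [stepR, h']]
      rw [ih]
      simp only [recGroups, h', Bool.false_eq_true, if_false, mapFirst_mapFirst]
      congr 1
      cases hg : recGroups structure_ order r with
      | nil => exact absurd hg (recGroups_ne_nil structure_ order r)
      | cons g t =>
        simp only [mapFirst, List.cons.injEq, Prod.mk.injEq]
        exact ⟨⟨by simp, by omega⟩, trivial⟩

lemma segOf_cons (order : List String) (a b : Int) (h : a < b) :
    segOf order a b = ordAt order a :: segOf order (a + 1) b := by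
  simp [segOf, PySem.List.pyRange_one_cons h]

lemma sumOf_cons (structure_ : List (List (List Int))) (a b : Int) (h : a < b) :
    sumOf structure_ a b = cellIter structure_ a + sumOf structure_ (a + 1) b := by
  simp [sumOf, PySem.List.pyRange_one_cons h]

lemma segOf_nil (order : List String) (a b : Int) (h : b ≤ a) : segOf order a b = [] := by
  simp [segOf, PySem.List.pyRange_one_eq_nil h]

lemma sumOf_nil (structure_ : List (List (List Int))) (a b : Int) (h : b ≤ a) :
    sumOf structure_ a b = 0 := by
  simp [sumOf, PySem.List.pyRange_one_eq_nil h]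

-- recGroups over a contiguous range is the pair list over the cuts
lemma recGroups_eq_pairs (structure_ : List (List (List Int))) (order : List String) :
    ∀ (m : Nat) (a n : Int), (n - a).toNat = m →
      recGroups structure_ order (PySem.List.pyRange a n 1)
        = (pairsOf (a - 1) ((PySem.List.pyRange a n 1).filter (fun k => sepAt order k)) n).map
            (fun p => (segOf order (p.1 + 1) p.2, sumOf structure_ (p.1 + 1) p.2)) := by
  intro m
  induction m with
  | zero =>
    intro a n h
    have hna : n ≤ a := by omega
    rw [PySem.List.pyRange_one_eq_nil hna]
    simp [recGroups, pairsOf, segOf_nil order a n hna, sumOf_nil structure_ a n hna]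
  | succ m ih =>
    intro a n h
    have han : a < n := by omega
    rw [PySem.List.pyRange_one_cons han]
    simp only [List.filter_cons, recGroups]
    by_cases hs : sepAt order a = true
    · rw [if_pos hs, if_pos hs, ih (a + 1) n (by omega)]
      simp only [pairsOf, List.cons_append, List.zip_cons_cons, List.map_cons]
      rw [show a + 1 - 1 = a by ring]
      rw [segOf_nil order (a - 1 + 1) a (by omega), sumOf_nil structure_ (a - 1 + 1) a (by omega)]
    · have hs' : sepAt order a = false := by simpa using hs
      rw [if_neg (by simp [hs']), if_neg (by simp [hs']), ih (a + 1) n (by omega)]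
      rw [show a + 1 - 1 = a by ring]
      cases hcs : (PySem.List.pyRange (a + 1) n 1).filter (fun k => sepAt order k) with
      | nil =>
        simp only [pairsOf, List.nil_append, List.zip_cons_cons, List.zip_nil_left,
          List.map_cons, List.map_nil, mapFirst]
        rw [show a - 1 + 1 = a by ring, segOf_cons order a n han, sumOf_cons structure_ a n han]
      | cons c cs' =>
        have hc : a < c := by
          have : c ∈ PySem.List.pyRange (a + 1) n 1 := by
            have : c ∈ (PySem.List.pyRange (a + 1) n 1).filter (fun k => sepAt order k) := by
              rw [hcs]; exact List.mem_cons_self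
            exact List.mem_of_mem_filter this
          have := (PySem.List.mem_pyRange_one.mp this).1
          omega
        simp only [pairsOf, List.cons_append, List.zip_cons_cons, List.map_cons, mapFirst]
        rw [show a - 1 + 1 = a by ring, segOf_cons order a c hc, sumOf_cons structure_ a c hc]

-- the prefix-sum loop is scanl
lemma foldl_prefStep (l : List Int) :
    ∀ (pre : List Int) (s : Int),
      l.foldl prefStep (pre ++ [s]) = pre ++ List.scanl (· + ·) s l := by
  induction l with
  | nil => intro pre s; simp only [List.foldl_nil, List.scanl_nil]
  | cons v r ih =>
    intro pre s
    simp only [List.foldl_cons]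
    rw [show prefStep (pre ++ [s]) v = (pre ++ [s]) ++ [s + v] by
      simp [prefStep, PySem.List.pyGetD_neg_one_append_singleton]]
    rw [ih (pre ++ [s]) (s + v)]
    simp only [List.scanl_cons, List.append_assoc, List.singleton_append]

lemma scanl_getD (l : List Int) :
    ∀ (s : Int) (j : Nat), j ≤ l.length →
      (List.scanl (· + ·) s l).getD j 0 = s + (l.take j).sum := by
  induction l with
  | nil =>
    intro s j h
    have hj : j = 0 := by simpa using h
    subst hj; simp [List.scanl_nil]
  | cons v r ih =>
    intro s j h
    cases j with
    | zero => simp [List.scanl_cons]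
    | succ j =>
      simp only [List.scanl_cons, List.getD_cons_succ, List.take_succ_cons, List.sum_cons]
      rw [ih (s + v) j (by simpa using h)]
      ring

-- pref[b] is the sum of the first b iteration counts
lemma pref_getD (structure_ : List (List (List Int))) (n : Int) (hn : 0 ≤ n) (b : Nat)
    (hb : (b : Int) ≤ n) :
    PySem.List.pyGetD (((PySem.List.pyRange 0 n 1).map (cellIter structure_)).foldl prefStep [0])
      (b : Int) 0 = sumOf structure_ 0 b := by
  rw [show ([0] : List Int) = [] ++ [0] by simp, foldl_prefStep]
  rw [PySem.List.pyGetD_natCast]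
  simp only [List.nil_append]
  rw [scanl_getD _ 0 b (by simp [PySem.List.length_pyRange_one]; omega)]
  rw [← List.map_take]
  rw [show (PySem.List.pyRange 0 n 1).take b = PySem.List.pyRange 0 (b : Int) 1 by
    rw [PySem.List.pyRange_one_append 0 (b : Int) n (by omega) hb]
    rw [List.take_append_of_le_length (by simp [PySem.List.length_pyRange_one])]
    rw [List.take_of_length_le (by simp [PySem.List.length_pyRange_one])]]
  simp [sumOf]

-- pref[y] - pref[x+1] = sum over [x+1, y)
lemma pref_diff (structure_ : List (List (List Int))) (n : Int) (hn : 0 ≤ n)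
    (x y : Int) (hx : -1 ≤ x) (hxy : x < y) (hy : y ≤ n) :
    PySem.List.pyGetD (((PySem.List.pyRange 0 n 1).map (cellIter structure_)).foldl prefStep [0]) y 0
      - PySem.List.pyGetD (((PySem.List.pyRange 0 n 1).map (cellIter structure_)).foldl prefStep [0]) (x + 1) 0
      = sumOf structure_ (x + 1) y := by
  obtain ⟨b, rfl⟩ : ∃ b : Nat, y = (b : Int) := ⟨y.toNat, by omega⟩
  obtain ⟨c, hc⟩ : ∃ c : Nat, x + 1 = (c : Int) := ⟨(x + 1).toNat, by omega⟩
  rw [hc, pref_getD structure_ n hn b hy, pref_getD structure_ n hn c (by omega)]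
  have hsplit : sumOf structure_ 0 b = sumOf structure_ 0 c + sumOf structure_ c b := by
    simp only [sumOf]
    rw [PySem.List.pyRange_one_append 0 (c : Int) (b : Int) (by omega) (by omega)]
    simp
  rw [← hc] at hsplit ⊢
  omega

-- chain of strict inequalities along the cut list
lemma pairs_chain (hi : Int) :
    ∀ (cs : List Int) (lo : Int), (lo :: cs ++ [hi]).Pairwise (· < ·) →
      ∀ p ∈ pairsOf lo cs hi, lo ≤ p.1 ∧ p.1 < p.2 ∧ p.2 ≤ hi := by
  intro cs
  induction cs with
  | nil =>
    intro lo h p hp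
    simp only [pairsOf, List.nil_append, List.zip_cons_cons, List.zip_nil_left,
      List.mem_singleton] at hp
    subst hp
    refine ⟨le_rfl, ?_, le_rfl⟩
    simpa using (List.pairwise_cons.mp h).1 hi (by simp)
  | cons c cs' ih =>
    intro lo h p hp
    have h2 := (List.pairwise_cons.mp h).2
    have hlc : lo < c := by simpa using (List.pairwise_cons.mp h).1 c (by simp)
    simp only [pairsOf, List.cons_append, List.zip_cons_cons] at hp
    rcases List.mem_cons.mp hp with rfl | hmem
    · refine ⟨le_rfl, hlc, ?_⟩
      have : c < hi := by simpa using (List.pairwise_cons.mp h2).1 hi (by simp)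
      omega
    · have := ih c h2 p hmem
      exact ⟨by omega, this.2.1, this.2.2⟩

-- a slice of order over an in-bounds range is the map of pyGetD over that range
lemma slice_eq_segOf (order : List String) :
    ∀ (m : Nat) (c d : Int), (d - c).toNat = m → 0 ≤ c → 0 ≤ d → d ≤ (order.length : Int) →
      PySem.List.slice order (some c) (some d) = segOf order c d := by
  intro m
  induction m with
  | zero =>
    intro c d h hc hd0 hd
    have hdc : d ≤ c := by omega
    rw [segOf_nil order c d hdc]
    rw [PySem.List.slice_toNat order hc hd0]
    simp [show d.toNat - c.toNat = 0 by omega]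
  | succ m ih =>
    intro c d h hc hd0 hd
    have hcd : c < d := by omega
    rw [segOf_cons order c d hcd]
    rw [← ih (c + 1) d (by omega) (by omega) hd0 hd]
    rw [PySem.List.slice_toNat order hc hd0,
        PySem.List.slice_toNat order (by omega) hd0]
    have hclen : c.toNat < order.length := by omega
    rw [List.drop_eq_getElem_cons hclen]
    rw [show (c + 1).toNat = c.toNat + 1 by omega]
    rw [show d.toNat - c.toNat = (d.toNat - (c.toNat + 1)) + 1 by omega]
    rw [List.take_succ_cons]
    congr 1
    rw [ordAt, PySem.List.pyGetD_eq_getElem (xs := order) (i := c) (d := "") (by omega) (by omega)]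

-- zip l (tail l) indexes as consecutive pairs
lemma zip_tail_getD (l : List Int) :
    ∀ j : Nat, j + 1 < l.length →
      (l.zip l.tail).getD j (0, 0) = (l.getD j 0, l.getD (j + 1) 0) := by
  induction l with
  | nil => intro j h; simp at h
  | cons x r ih =>
    intro j h
    cases r with
    | nil => simp at h
    | cons y t =>
      cases j with
      | zero => simp
      | succ j =>
        simp only [List.tail_cons, List.zip_cons_cons, List.getD_cons_succ]
        exact ih j (by simpa using h)

lemma foldl_max_init (l : List Int) : ∀ a b : Int, l.foldl max (max a b) = max a (l.foldl max b) := by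
  induction l with
  | nil => intro a b; rfl
  | cons x r ih =>
    intro a b
    simp only [List.foldl_cons]
    rw [max_assoc] at *
    exact ih a (max b x)

-- A's index loop over range(len(fuse)) is selLoop over the totals
lemma foldl_selStep (xs : List Int) :
    ∀ (ts pre : List Int), xs = pre ++ ts → ∀ mi : Int × Int,
      (PySem.List.pyRange (pre.length : Int) (xs.length : Int) 1).foldl (selStepA xs) mi
        = selLoop ts (pre.length : Int) mi.1 mi.2 := by
  intro ts
  induction ts with
  | nil =>
    intro pre h mi
    simp [h, PySem.List.pyRange_one_eq_nil, selLoop]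
  | cons t r ih =>
    intro pre h mi
    have hlt : (pre.length : Int) < (xs.length : Int) := by
      subst h; simp
    rw [PySem.List.pyRange_one_cons hlt]
    have hget : PySem.List.pyGetD xs (pre.length : Int) 0 = t := by
      subst h
      rw [PySem.List.pyGetD_natCast]
      simp [List.getD_eq_getElem?_getD]
    have hnext := ih (pre ++ [t]) (by simp [h])
    simp only [List.length_append, List.length_cons, List.length_nil] at hnext
    push_cast at hnext ⊢
    simp only [List.foldl_cons]
    by_cases hb : t > mi.1
    · rw [show selStepA xs mi (pre.length : Int) = (t, (pre.length : Int)) by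
        simp [selStepA, hget, hb]]
      rw [hnext]
      simp [selLoop, hb]
    · rw [show selStepA xs mi (pre.length : Int) = mi by simp [selStepA, hget, hb]]
      rw [hnext]
      simp [selLoop, hb]

lemma selLoop_spec : ∀ (ts : List Int) (i maxi id : Int),
    selLoop ts i maxi id =
      if ts.foldl max maxi ≤ maxi then (maxi, id)
      else (ts.foldl max maxi,
            i + ((ts.findIdx (fun t => decide (t = ts.foldl max maxi))) : Int)) := by
  intro ts
  induction ts with
  | nil => intro i maxi id; simp [selLoop]
  | cons t r ih =>
    intro i maxi id
    have hmax : ∀ a : Int, a ≤ r.foldl max a := fun a => (PySem.List.le_foldl_max r a).1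
    simp only [selLoop, List.foldl_cons]
    by_cases hb : t > maxi
    · rw [if_pos hb, ih]
      have h1 : max maxi t = t := by omega
      simp only [h1]
      have hMr : t ≤ r.foldl max t := hmax t
      by_cases h2 : r.foldl max t ≤ t
      · have hMr' : r.foldl max t = t := le_antisymm h2 hMr
        rw [if_pos h2, if_neg (by omega), hMr']
        simp [List.findIdx_cons]
      · rw [if_neg h2, if_neg (by omega)]
        have hne : ¬ (t = r.foldl max t) := by omega
        simp [List.findIdx_cons, hne]
        omega
    · rw [if_neg hb, ih]
      have h1 : max maxi t = maxi := by omega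
      simp only [h1]
      by_cases h2 : r.foldl max maxi ≤ maxi
      · rw [if_pos h2, if_pos h2]
      · rw [if_neg h2, if_neg h2]
        have hne : ¬ (t = r.foldl max maxi) := by omega
        simp [List.findIdx_cons, hne]
        omega

-- totals.index(best) for a member is findIdx of the equality test
lemma index_getD_eq_findIdx (v : Int) :
    ∀ (l : List Int), v ∈ l →
      ((PySem.List.index? l v).getD 0 : Nat) = l.findIdx (fun t => decide (t = v)) := by
  intro l
  induction l with
  | nil => intro h; simp at h
  | cons x r ih =>
    intro h
    by_cases hx : x = v
    · subst hx
      rw [PySem.List.index?_cons_self]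
      simp [List.findIdx_cons]
    · have hv : v ∈ r := by
        cases List.mem_cons.mp h with
        | inl h1 => exact absurd h1.symm hx
        | inr h2 => exact h2
      rw [show PySem.List.index? (x :: r) v = (PySem.List.index? r v).map (· + 1) from
        PySem.List.index?_cons_of_ne r hx]
      cases hk : PySem.List.index? r v with
      | none => exact absurd ((PySem.List.index?_eq_none_iff r v).mp hk) (by simp [hv])
      | some k =>
        simp only [Option.map_some, Option.getD_some, List.findIdx_cons]
        rw [show (decide (x = v)) = false by simpa using hx]
        simp only [cond_false]
        have := ih hv
        rw [hk] at this
        simp only [Option.getD_some] at this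
        omega

lemma findIdx_lt_length_of_mem {l : List Int} {v : Int} (h : v ∈ l) :
    l.findIdx (fun t => decide (t = v)) < l.length :=
  List.findIdx_lt_length_of_exists ⟨v, h, by simp⟩

lemma zip_append_right (xs ys : List Int) (a : Int) (h : ys.length ≤ xs.length) :
    (xs ++ [a]).zip ys = xs.zip ys := by
  induction xs generalizing ys with
  | nil =>
    cases ys with
    | nil => simp
    | cons y t => simp at h
  | cons x xt ih =>
    cases ys with
    | nil => simp
    | cons y t =>
      simp only [List.cons_append, List.zip_cons_cons]
      rw [ih t (by simpa using h)]

lemma cuts_pairwise (n : Int) (hn : 0 ≤ n) (p : Int → Bool) :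
    ((-1 : Int) :: (PySem.List.pyRange 0 n 1).filter p ++ [n]).Pairwise (· < ·) := by
  have hpw : ((PySem.List.pyRange 0 n 1).filter p).Pairwise (· < ·) :=
    (PySem.List.pairwise_lt_pyRange_one 0 n).sublist List.filter_sublist
  have hmem : ∀ c ∈ (PySem.List.pyRange 0 n 1).filter p, 0 ≤ c ∧ c < n := by
    intro c hc
    have := PySem.List.mem_pyRange_one.mp (List.mem_of_mem_filter hc)
    omega
  refine List.Pairwise.cons ?_ ?_
  · intro a ha
    rcases List.mem_append.mp ha with h | h
    · have := hmem a h; omega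
    · simp at h; omega
  · refine List.pairwise_append.mpr ⟨hpw, by simp, ?_⟩
    intro x hx y hy
    simp at hy; subst hy
    exact (hmem x hx).2

lemma getD_map_pair {α : Type} (f : Int × Int → α) (l : List (Int × Int)) (j : Nat)
    (h : j < l.length) (d : α) : (l.map f).getD j d = f (l.getD j (0, 0)) := by
  have h1 : l[j]? = some l[j] := List.getElem?_eq_getElem h
  simp [List.getD_eq_getElem?_getD, h1]

lemma getD_mem_pair (l : List (Int × Int)) (j : Nat) (h : j < l.length) :
    l.getD j (0, 0) ∈ l := by
  rw [List.getD_eq_getElem?_getD, List.getElem?_eq_getElem h]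
  exact List.getElem_mem h

-- ===== VERDICT (by name: the statement is the Claim_ definition above) =====
theorem find_fuse_spec : Claim_equal_find_fuse := by
  intro structure_ level order _ hpre
  unfold Spec_find_fuse find_fuse find_fuse_alt
  have hn0 : (0 : Int) ≤ max (level - 1) 0 := le_max_right _ _
  set n : Int := max (level - 1) 0 with hn
  have hrange : PySem.List.pyRange 0 (level - 1) 1 = PySem.List.pyRange 0 n 1 := by
    by_cases h : level - 1 ≤ 0
    · rw [PySem.List.pyRange_one_eq_nil h, hn, max_eq_right h, PySem.List.pyRange_one_eq_nil le_rfl]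
    · rw [hn, max_eq_left (by omega)]
  have hnlen : n ≤ (order.length : Int) := by
    by_cases h : n ≤ 0
    · have : (0 : Int) ≤ (order.length : Int) := by positivity
      omega
    · have hlev : n = level - 1 := by
        rcases max_cases (level - 1) 0 with ⟨h1, _⟩ | ⟨h1, h2⟩
        · rw [hn, h1]
        · rw [hn, h1] at h; omega
      have hk := hpre.1
      omega
  simp only [hrange]
  set ks := PySem.List.pyRange 0 n 1 with hks
  -- phase 1: A's accumulators are the records of recGroups
  have h1 := phase1_rel structure_ order ks [] [] 0
  simp only [List.map_nil] at h1
  simp only [h1]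
  set R := ks.foldl (stepR structure_ order) ([], [], 0) with hR
  have h2 : R.1 ++ [(R.2.1, R.2.2)] = recGroups structure_ order ks := by
    rw [hR, flush_eq_recGroups structure_ order ks [] [] 0]
    cases hg : recGroups structure_ order ks with
    | nil => exact absurd hg (recGroups_ne_nil _ _ _)
    | cons g t => simp [mapFirst]
  have hfuse : R.1.map Prod.fst ++ [R.2.1] = (recGroups structure_ order ks).map Prod.fst := by
    rw [← h2]; simp
  have hnbf : R.1.map Prod.snd ++ [R.2.2] = (recGroups structure_ order ks).map Prod.snd := by
    rw [← h2]; simp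
  simp only [hfuse, hnbf]
  -- phase 2: recGroups over the range is the pair list over the cuts
  have hsepfun : (fun k => PySem.Str.isIn "in_channels" (PySem.List.pyGetD order k "")) =
      (fun k => sepAt order k) := rfl
  simp only [hsepfun]
  set cs := ks.filter (fun k => sepAt order k) with hcs
  have h3 : recGroups structure_ order ks
      = (pairsOf (-1) cs n).map
          (fun p => (segOf order (p.1 + 1) p.2, sumOf structure_ (p.1 + 1) p.2)) := by
    have := recGroups_eq_pairs structure_ order (n - 0).toNat 0 n rfl
    rw [show (0 : Int) - 1 = -1 by ring] at this
    rw [hks, hcs, this]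
  set pairs := pairsOf (-1) cs n with hpairs
  -- the zip in B builds exactly these pairs
  have hzip : ([-1] ++ cs ++ [n]).zip (PySem.List.slice ([-1] ++ cs ++ [n]) (some 1) none)
      = pairs := by
    rw [PySem.List.slice_from_one]
    rw [show ([-1] ++ cs ++ [n] : List Int).tail = cs ++ [n] by simp]
    rw [show ([-1] ++ cs ++ [n] : List Int) = (-1 :: cs) ++ [n] by simp]
    rw [zip_append_right _ _ _ (by simp)]
    rfl
  simp only [hzip]
  -- the totals in B are the per-group sums
  have hpw : ((-1 : Int) :: cs ++ [n]).Pairwise (· < ·) := by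
    rw [hcs, hks]; exact cuts_pairwise n hn0 _
  have hchain := pairs_chain n cs (-1) hpw
  rw [← hpairs] at hchain
  have h5 : pairs.map (fun ab =>
        PySem.List.pyGetD ((ks.map (cellIter structure_)).foldl prefStep [0]) ab.2 0
        - PySem.List.pyGetD ((ks.map (cellIter structure_)).foldl prefStep [0]) (ab.1 + 1) 0)
      = pairs.map (fun p => sumOf structure_ (p.1 + 1) p.2) :=
    List.map_congr_left (fun p hp => by
      have h := hchain p hp
      rw [hks]
      exact pref_diff structure_ n hn0 p.1 p.2 h.1 h.2.1 h.2.2)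
  simp only [h3, h5, List.map_map]
  set T := pairs.map (fun p => sumOf structure_ (p.1 + 1) p.2) with hT
  set S := pairs.map (fun p => segOf order (p.1 + 1) p.2) with hS
  have hTcomp : pairs.map ((fun x => x.2) ∘ fun p => (segOf order (p.1 + 1) p.2, sumOf structure_ (p.1 + 1) p.2)) = T := rfl
  have hScomp : pairs.map ((fun x => x.1) ∘ fun p => (segOf order (p.1 + 1) p.2, sumOf structure_ (p.1 + 1) p.2)) = S := rfl
  simp only [hTcomp, hScomp]
  -- A's selection loop
  have hlenST : S.length = T.length := by rw [hS, hT]; simp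
  have hpairs_ne : pairs ≠ [] := by
    rw [hpairs, pairsOf]
    cases cs <;> simp
  have hsel : (PySem.List.pyRange 0 (S.length : Int) 1).foldl (selStepA T) (0, 0)
      = selLoop T 0 0 0 := by
    have := foldl_selStep T T [] (by simp) (0, 0)
    simpa [hlenST] using this
  rw [hsel, selLoop_spec]
  -- name the true maximum
  cases hTc : T with
  | nil =>
    exfalso
    have hlp := congrArg List.length hTc
    simp [hT] at hlp
    exact hpairs_ne hlp
  | cons t0 tr =>
    rw [PySem.List.max?_id_cons, Option.getD_some]
    have hM0 : (t0 :: tr).foldl max 0 = max 0 (tr.foldl max t0) := by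
      simp only [List.foldl_cons]
      rw [show max (0 : Int) t0 = max 0 t0 from rfl, foldl_max_init]
    rw [← hTc]
    set M := tr.foldl max t0 with hM
    have hM0' : T.foldl max 0 = max 0 M := by rw [hTc]; exact hM0
    have hMmem : M ∈ T := by
      rw [hTc, hM]
      rcases PySem.List.foldl_max_mem tr t0 with h | h
      · rw [h]; exact List.mem_cons_self
      · exact List.mem_cons_of_mem _ h
    have hplen : pairs.length = T.length := by rw [hT]; simp
    have hcuts_cons : ([-1] ++ cs ++ [n] : List Int) = -1 :: (cs ++ [n]) := by simp
    have hzip' : pairs = (-1 :: (cs ++ [n])).zip (-1 :: (cs ++ [n])).tail := by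
      rw [← hzip, PySem.List.slice_from_one, hcuts_cons]
    have hcutlen : (-1 :: (cs ++ [n]) : List Int).length = pairs.length + 1 := by
      rw [hpairs, pairsOf]
      simp
    by_cases hb : M ≤ 0
    · -- no positive total: both return the first group with 0
      rw [if_pos (by omega : T.foldl max 0 ≤ 0), if_pos hb]
      have hplen0 : 0 < pairs.length := List.length_pos_iff.mpr hpairs_ne
      obtain ⟨hc1, hc2, hc3⟩ := hchain _ (getD_mem_pair pairs 0 hplen0)
      have hcuts0 : PySem.List.pyGetD ([-1] ++ cs ++ [n] : List Int) 0 0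
          = (pairs.getD 0 (0, 0)).1 := by
        rw [hcuts_cons, hzip', zip_tail_getD _ 0 (by omega)]
        simp [PySem.List.pyGetD_zero]
      have hcuts1 : PySem.List.pyGetD ([-1] ++ cs ++ [n] : List Int) 1 0
          = (pairs.getD 0 (0, 0)).2 := by
        rw [hcuts_cons, hzip', zip_tail_getD _ 0 (by omega)]
        rw [show (1 : Int) = ((1 : Nat) : Int) by norm_num, PySem.List.pyGetD_natCast]
      have hS0 : PySem.List.pyGetD S (0 : Int) []
          = segOf order ((pairs.getD 0 (0, 0)).1 + 1) (pairs.getD 0 (0, 0)).2 := by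
        rw [PySem.List.pyGetD_zero, hS, getD_map_pair _ pairs 0 hplen0]
      simp only [hcuts0, hcuts1]
      rw [hS0,
        slice_eq_segOf order ((pairs.getD 0 (0, 0)).2 - ((pairs.getD 0 (0, 0)).1 + 1)).toNat
          ((pairs.getD 0 (0, 0)).1 + 1) (pairs.getD 0 (0, 0)).2 rfl (by omega) (by omega) (by omega)]
    · -- a positive maximum: both return the first group attaining it
      rw [if_neg (by omega : ¬ T.foldl max 0 ≤ 0), if_neg hb]
      rw [hM0', max_eq_right (by omega : (0 : Int) ≤ M)]
      have hj := index_getD_eq_findIdx M T hMmem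
      rw [hj]
      set j := T.findIdx (fun t => decide (t = M)) with hjdef
      have hjlen : j < T.length := findIdx_lt_length_of_mem hMmem
      have hjp : j < pairs.length := by omega
      obtain ⟨hc1, hc2, hc3⟩ := hchain _ (getD_mem_pair pairs j hjp)
      have hcutsj : PySem.List.pyGetD ([-1] ++ cs ++ [n] : List Int) (j : Int) 0
          = (pairs.getD j (0, 0)).1 := by
        rw [hcuts_cons, hzip', zip_tail_getD _ j (by omega)]
        rw [PySem.List.pyGetD_natCast]
      have hcutsj1 : PySem.List.pyGetD ([-1] ++ cs ++ [n] : List Int) ((j : Int) + 1) 0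
          = (pairs.getD j (0, 0)).2 := by
        rw [hcuts_cons, hzip', zip_tail_getD _ j (by omega)]
        rw [show ((j : Int) + 1) = (((j + 1 : Nat)) : Int) by push_cast; ring,
          PySem.List.pyGetD_natCast]
      have hSj : PySem.List.pyGetD S (0 + (j : Int)) []
          = segOf order ((pairs.getD j (0, 0)).1 + 1) (pairs.getD j (0, 0)).2 := by
        rw [show (0 + (j : Int)) = ((j : Nat) : Int) by ring, PySem.List.pyGetD_natCast,
          hS, getD_map_pair _ pairs j hjp]
      simp only [hcutsj, hcutsj1]
      rw [hSj,
        slice_eq_segOf order ((pairs.getD j (0, 0)).2 - ((pairs.getD j (0, 0)).1 + 1)).toNat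
          ((pairs.getD j (0, 0)).1 + 1) (pairs.getD j (0, 0)).2 rfl (by omega) (by omega) (by omega)]
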